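-- pv_equiv track=rewrite | github.com/EddieDavison92/cluster_creator | main.py | expand_codes_for_concept
-- ===== SOURCE A (Python) =====
-- from typing import Dict, Set, List
--
-- def expand_codes_for_concept(code: str,
--                              history_dict: Dict[str, Set[str]],
--                              trans_dict: Dict[str, Set[str]]) -> Set[str]:
--     """
--     Expand a given SNOMED code by including any history replacements and recursively
--     finding all child codes (and their history replacements). Both the original and any
--     replacement codes are used as expansion points.
--     """
--     # Start with the original code and its history replacements (if any)
--     base_set: Set[str] = {code} | history_dict.get(code, set())
--     expanded_codes: Set[str] = set(base_set)
--     to_process: Set[str] = set(base_set)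
--
--     while to_process:
--         new_codes: Set[str] = set()
--         for current_code in to_process:
--             children = trans_dict.get(current_code, set())
--             for child in children:
--                 child_replacements = history_dict.get(child, set())
--                 new_codes.add(child)
--                 new_codes |= child_replacements
--         new_codes -= expanded_codes
--         if not new_codes:
--             break
--         expanded_codes |= new_codes
--         to_process = new_codes
--     return expanded_codes
-- ===== SOURCE B (Python) =====
-- def expand_codes_for_concept(code, history_dict, trans_dict):
--     """Worklist traversal: pop one code at a time instead of level-synchronous
--     frontier sets; visited doubles as the result."""
--     visited = {code} | history_dict.get(code, set())
--     worklist = list(visited)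
--     while worklist:
--         current = worklist.pop(0)
--         for child in trans_dict.get(current, set()):
--             for item in [child, *history_dict.get(child, set())]:
--                 if item not in visited:
--                     visited.add(item)
--                     worklist.append(item)
--     return visited
-- ===== Notes on version B (the rewrite author's own statement) =====
-- stated objective: simpler
-- what changed: Replaced A's level-synchronous wavefront (building a whole frontier set per round, then batch set-difference and union) with a single FIFO worklist that pops one code at a time and adds each unseen child/replacement with a per-item membership check; visited doubles as the result.
import Mathlib
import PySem

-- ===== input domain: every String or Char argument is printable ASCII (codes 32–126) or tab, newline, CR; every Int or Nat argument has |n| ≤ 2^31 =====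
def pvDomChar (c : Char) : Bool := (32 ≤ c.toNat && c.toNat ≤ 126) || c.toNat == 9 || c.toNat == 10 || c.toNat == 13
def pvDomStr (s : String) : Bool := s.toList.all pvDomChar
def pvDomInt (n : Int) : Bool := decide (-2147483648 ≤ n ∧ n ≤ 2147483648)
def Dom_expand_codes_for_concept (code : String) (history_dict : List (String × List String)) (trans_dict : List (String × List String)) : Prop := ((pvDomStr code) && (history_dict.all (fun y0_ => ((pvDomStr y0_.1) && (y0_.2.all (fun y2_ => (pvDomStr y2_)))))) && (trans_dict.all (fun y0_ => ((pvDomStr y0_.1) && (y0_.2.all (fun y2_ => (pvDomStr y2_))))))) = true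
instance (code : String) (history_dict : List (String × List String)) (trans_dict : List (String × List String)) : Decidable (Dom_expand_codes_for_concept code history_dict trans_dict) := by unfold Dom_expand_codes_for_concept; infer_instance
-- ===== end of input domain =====

-- B replaces A's level-synchronous frontier-set loop by a single FIFO worklist that pops one
-- code at a time with per-item membership checks (objective: simpler).

-- shared dict lookup: d.get(k, set()) (first match on the association list)
def pvGet (d : List (String × List String)) (k : String) : List String :=
  (PySem.Dict.mk d).getD k []

-- fuel bound used by both loops (a totality guard only: every code ever reached is one of these)
def pvUniv (code : String) (history_dict : List (String × List String)) (trans_dict : List (String × List String)) : List String :=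
  code :: (history_dict.flatMap (fun p => p.2) ++ trans_dict.flatMap (fun p => p.2))

-- ===== PORT A =====
def pvLoopA (hist trans : List (String × List String)) : Nat → List String → List String → List String
  | 0, E, _ => E
  | f+1, E, P =>
    if P = [] then E
    else
      -- new_codes = {}; for current in to_process: for child in trans.get(current, set()):
      --   new_codes.add(child); new_codes |= history.get(child, set())
      let nc0 := P.foldl (fun nc c =>
          (pvGet trans c).foldl (fun nc child =>
            PySem.Set.union (PySem.Set.add nc child) (pvGet hist child)) nc)
        PySem.Set.empty
      -- new_codes -= expanded_codes
      let nc := PySem.Set.diff nc0 E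
      if nc = [] then E
      else pvLoopA hist trans f (PySem.Set.union E nc) nc

def expand_codes_for_concept (code : String) (history_dict : List (String × List String)) (trans_dict : List (String × List String)) : List String :=
  let base := PySem.Set.union (PySem.Set.ofList [code]) (pvGet history_dict code)
  pvLoopA history_dict trans_dict ((pvUniv code history_dict trans_dict).length + 1) base base

-- ===== PORT B =====
def pvLoopB (hist trans : List (String × List String)) : Nat → List String → List String → List String
  | 0, V, _ => V
  | _+1, V, [] => V
  | f+1, V, cur :: rest =>
      -- current = worklist.pop(0); for child in trans.get(current, set()):
      --   for item in [child, *history.get(child, set())]: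
      --     if item not in visited: visited.add(item); worklist.append(item)
      let s := (pvGet trans cur).foldl (fun (s : List String × List String) child =>
          (child :: pvGet hist child).foldl (fun s item =>
              if item ∈ s.1 then s else (s.1 ++ [item], s.2 ++ [item])) s)
        (V, rest)
      pvLoopB hist trans f s.1 s.2

def expand_codes_for_concept_alt (code : String) (history_dict : List (String × List String)) (trans_dict : List (String × List String)) : List String :=
  let visited := PySem.Set.union (PySem.Set.ofList [code]) (pvGet history_dict code)
  pvLoopB history_dict trans_dict ((pvUniv code history_dict trans_dict).length + 1) visited visited

-- ===== PRECONDITION & SPEC =====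
def Spec_expand_codes_for_concept (code : String) (history_dict : List (String × List String)) (trans_dict : List (String × List String)) (out : List String) : Prop := out = expand_codes_for_concept_alt code history_dict trans_dict
instance (code : String) (history_dict : List (String × List String)) (trans_dict : List (String × List String)) (out : List String) : Decidable (Spec_expand_codes_for_concept code history_dict trans_dict out) := by unfold Spec_expand_codes_for_concept; infer_instance

-- ===== CLAIM (what is proved, stated in full; the proofs are below) =====
def Claim_equal_expand_codes_for_concept : Prop := ∀ (code : String) (history_dict : List (String × List String)) (trans_dict : List (String × List String)), Dom_expand_codes_for_concept code history_dict trans_dict → Spec_expand_codes_for_concept code history_dict trans_dict (expand_codes_for_concept code history_dict trans_dict)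

-- ===== LEMMAS AND PROOFS =====

-- the per-node expansion list: each child followed by its history replacements
def pvExt (hist trans : List (String × List String)) (c : String) : List String :=
  (pvGet trans c).flatMap (fun ch => ch :: pvGet hist ch)

def pvMu (N : Nat) (V Q : List String) : Nat := (N - V.length) + Q.length

theorem pvGet_subset (d : List (String × List String)) (k x : String)
    (hx : x ∈ pvGet d k) : x ∈ d.flatMap (fun p => p.2) := by
  unfold pvGet PySem.Dict.getD at hx
  cases h : (PySem.Dict.mk d).get? k with
  | none => rw [h] at hx; simp at hx
  | some v =>
    rw [h] at hx
    unfold PySem.Dict.get? at h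
    simp only [Option.map_eq_some_iff] at h
    obtain ⟨p, hp, hpv⟩ := h
    have hpd : p ∈ d := List.mem_of_find?_eq_some hp
    simp only [Option.getD_some] at hx
    exact List.mem_flatMap.2 ⟨p, hpd, by rw [hpv]; exact hx⟩

theorem pvExt_subset (code : String) (hist trans : List (String × List String)) (c x : String)
    (hx : x ∈ pvExt hist trans c) : x ∈ pvUniv code hist trans := by
  unfold pvExt at hx
  obtain ⟨ch, hch, hx⟩ := List.mem_flatMap.1 hx
  unfold pvUniv
  rcases List.mem_cons.1 hx with rfl | hx
  · exact List.mem_cons_of_mem _ (List.mem_append.2 (Or.inr (pvGet_subset _ _ _ hch)))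
  · exact List.mem_cons_of_mem _ (List.mem_append.2 (Or.inl (pvGet_subset _ _ _ hx)))

theorem pvLenBound (U V : List String) (hnd : V.Nodup) (hsub : ∀ a ∈ V, a ∈ U) :
    V.length ≤ U.toFinset.card := by
  have h1 : V.toFinset ⊆ U.toFinset := by
    intro a ha; simp only [List.mem_toFinset] at *; exact hsub a ha
  calc V.length = V.toFinset.card := (List.toFinset_card_of_nodup hnd).symm
    _ ≤ U.toFinset.card := Finset.card_le_card h1

theorem pvPrefix_update (xs : List String) (s : List String) : s <+: PySem.Set.update s xs := by
  induction xs generalizing s with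
  | nil => exact List.prefix_refl s
  | cons x xs ih =>
    have h1 : s <+: PySem.Set.add s x := by
      unfold PySem.Set.add; split
      · exact List.prefix_refl s
      · exact ⟨[x], rfl⟩
    exact h1.trans (ih (PySem.Set.add s x))

theorem pvDrop_chain (V V1 V2 : List String) (h1 : V <+: V1) (h2 : V1 <+: V2) :
    V1.drop V.length ++ V2.drop V1.length = V2.drop V.length := by
  obtain ⟨s, rfl⟩ := h1
  obtain ⟨t, rfl⟩ := h2
  simp [List.append_assoc]

-- A's inner double loop builds the insertion-ordered set of P.flatMap (pvExt …)
theorem pvInnerA_child (hist : List (String × List String)) (l : List String) (nc : List String) :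
    l.foldl (fun nc child => PySem.Set.union (PySem.Set.add nc child) (pvGet hist child)) nc
      = PySem.Set.update nc (l.flatMap (fun ch => ch :: pvGet hist ch)) := by
  induction l generalizing nc with
  | nil => rfl
  | cons c l ih =>
    simp only [List.foldl_cons, List.flatMap_cons]
    rw [PySem.Set.update, List.foldl_append]
    exact ih _

theorem pvInnerA (hist trans : List (String × List String)) (P : List String) (nc : List String) :
    P.foldl (fun nc c =>
        (pvGet trans c).foldl (fun nc child =>
          PySem.Set.union (PySem.Set.add nc child) (pvGet hist child)) nc) nc
      = PySem.Set.update nc (P.flatMap (pvExt hist trans)) := by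
  induction P generalizing nc with
  | nil => rfl
  | cons c P ih =>
    simp only [List.foldl_cons, List.flatMap_cons]
    rw [PySem.Set.update, List.foldl_append]
    rw [pvInnerA_child]
    exact ih _

-- B's inner double loop is the pair-fold over pvExt, and it appends the new elements to both sides
theorem pvPairFold (xs : List String) (V W : List String) :
    xs.foldl (fun (s : List String × List String) item =>
        if item ∈ s.1 then s else (s.1 ++ [item], s.2 ++ [item])) (V, W)
      = (PySem.Set.update V xs, W ++ (PySem.Set.update V xs).drop V.length) := by
  induction xs generalizing V W with
  | nil => simp [PySem.Set.update]
  | cons x xs ih =>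
    simp only [List.foldl_cons]
    have hupd : PySem.Set.update V (x :: xs) = PySem.Set.update (PySem.Set.add V x) xs := by
      simp [PySem.Set.update]
    by_cases hx : x ∈ V
    · have hadd : PySem.Set.add V x = V := by
        unfold PySem.Set.add; rw [if_pos ((PySem.Set.contains_iff V x).2 hx)]
      rw [if_pos hx, ih, hupd, hadd]
    · have hadd : PySem.Set.add V x = V ++ [x] := by
        unfold PySem.Set.add
        rw [if_neg (by simp [hx])]
      rw [if_neg hx, ih (V ++ [x]) (W ++ [x]), hupd, hadd]
      refine Prod.ext rfl ?_
      simp only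
      obtain ⟨t, ht⟩ := pvPrefix_update xs (V ++ [x])
      rw [← ht]
      have e1 : List.drop (V ++ [x]).length (V ++ [x] ++ t) = t := List.drop_left
      have e2 : List.drop V.length (V ++ [x] ++ t) = [x] ++ t := by
        rw [List.append_assoc]; exact List.drop_left
      rw [e1, e2, List.append_assoc]

theorem pvStepB (hist trans : List (String × List String)) (f : Nat) (V : List String) (cur : String) (rest : List String) :
    pvLoopB hist trans (f+1) V (cur :: rest)
      = pvLoopB hist trans f (PySem.Set.update V (pvExt hist trans cur))
          (rest ++ (PySem.Set.update V (pvExt hist trans cur)).drop V.length) := by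
  have hflat : ∀ (l : List String) (s : List String × List String),
      l.foldl (fun (s : List String × List String) child =>
          (child :: pvGet hist child).foldl (fun s item =>
              if item ∈ s.1 then s else (s.1 ++ [item], s.2 ++ [item])) s) s
        = (l.flatMap (fun ch => ch :: pvGet hist ch)).foldl
            (fun (s : List String × List String) item =>
              if item ∈ s.1 then s else (s.1 ++ [item], s.2 ++ [item])) s := by
    intro l
    induction l with
    | nil => intro s; rfl
    | cons c l ih =>
      intro s
      simp only [List.foldl_cons, List.flatMap_cons, List.foldl_append]
      exact ih _
  have h0 : pvLoopB hist trans (f+1) V (cur :: rest)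
      = pvLoopB hist trans f
          ((pvGet trans cur).foldl (fun (s : List String × List String) child =>
              (child :: pvGet hist child).foldl (fun s item =>
                  if item ∈ s.1 then s else (s.1 ++ [item], s.2 ++ [item])) s) (V, rest)).1
          ((pvGet trans cur).foldl (fun (s : List String × List String) child =>
              (child :: pvGet hist child).foldl (fun s item =>
                  if item ∈ s.1 then s else (s.1 ++ [item], s.2 ++ [item])) s) (V, rest)).2 := rfl
  rw [h0, hflat, pvPairFold]
  rfl

theorem pvLoopB_nil (hist trans : List (String × List String)) (g : Nat) (V : List String) :
    pvLoopB hist trans g V [] = V := by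
  cases g <;> rfl

theorem pvBlock (hist trans : List (String × List String)) (P : List String) (g : Nat) (V Q : List String) :
    pvLoopB hist trans (g + P.length) V (P ++ Q)
      = pvLoopB hist trans g (PySem.Set.update V (P.flatMap (pvExt hist trans)))
          (Q ++ (PySem.Set.update V (P.flatMap (pvExt hist trans))).drop V.length) := by
  induction P generalizing V Q g with
  | nil => simp [PySem.Set.update]
  | cons c P ih =>
    have hlen : g + (c :: P).length = (g + P.length) + 1 := by simp [List.length_cons]; omega
    rw [hlen, List.cons_append, pvStepB]
    set V1 := PySem.Set.update V (pvExt hist trans c) with hV1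
    have hQ : (P ++ Q) ++ V1.drop V.length = P ++ (Q ++ V1.drop V.length) := by
      simp [List.append_assoc]
    rw [hQ, ih]
    have hV2 : PySem.Set.update V1 (P.flatMap (pvExt hist trans))
        = PySem.Set.update V ((c :: P).flatMap (pvExt hist trans)) := by
      simp [PySem.Set.update, List.flatMap_cons, List.foldl_append]
      rfl
    set V2 := PySem.Set.update V1 (P.flatMap (pvExt hist trans)) with hV2d
    have hdrop : V1.drop V.length ++ V2.drop V1.length = V2.drop V.length :=
      pvDrop_chain V V1 V2 (pvPrefix_update _ _) (pvPrefix_update _ _)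
    rw [← hV2, List.append_assoc, hdrop]

theorem pvFuelStep (hist trans : List (String × List String)) (U : List String)
    (hext : ∀ c x, x ∈ pvExt hist trans c → x ∈ U) (f : Nat) :
    ∀ (V Q : List String), V.Nodup → (∀ a ∈ V, a ∈ U) → pvMu U.toFinset.card V Q ≤ f →
      pvLoopB hist trans f V Q = pvLoopB hist trans (f+1) V Q := by
  induction f with
  | zero =>
    intro V Q hnd hsub hmu
    have hQ : Q = [] := by
      have : Q.length = 0 := by unfold pvMu at hmu; omega
      exact List.length_eq_zero_iff.1 this
    subst hQ
    rw [pvLoopB_nil, pvLoopB_nil]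
  | succ f ih =>
    intro V Q hnd hsub hmu
    cases Q with
    | nil => rw [pvLoopB_nil, pvLoopB_nil]
    | cons c Q' =>
      rw [pvStepB, pvStepB]
      have hnd1 : (PySem.Set.update V (pvExt hist trans c)).Nodup :=
        PySem.Set.nodup_update _ _ hnd
      have hsub1 : ∀ a ∈ PySem.Set.update V (pvExt hist trans c), a ∈ U := by
        intro a ha
        rcases (PySem.Set.mem_update _ _ _).1 ha with h | h
        · exact hsub a h
        · exact hext c a h
      apply ih _ _ hnd1 hsub1
      have hlenV : V.length ≤ (PySem.Set.update V (pvExt hist trans c)).length :=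
        (pvPrefix_update _ _).length_le
      have hN : (PySem.Set.update V (pvExt hist trans c)).length ≤ U.toFinset.card :=
        pvLenBound U _ hnd1 hsub1
      unfold pvMu at hmu ⊢
      simp only [List.length_cons] at hmu
      rw [List.length_append, List.length_drop]
      omega

theorem pvFuelAdd (hist trans : List (String × List String)) (U : List String)
    (hext : ∀ c x, x ∈ pvExt hist trans c → x ∈ U) (d f : Nat)
    (V Q : List String) (hnd : V.Nodup) (hsub : ∀ a ∈ V, a ∈ U) (hf : pvMu U.toFinset.card V Q ≤ f) :
    pvLoopB hist trans f V Q = pvLoopB hist trans (f+d) V Q := by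
  induction d with
  | zero => rfl
  | succ d ih =>
    rw [ih]
    exact pvFuelStep hist trans U hext (f+d) V Q hnd hsub (le_trans hf (Nat.le_add_right _ _))

theorem pvFuelCanon (hist trans : List (String × List String)) (U : List String)
    (hext : ∀ c x, x ∈ pvExt hist trans c → x ∈ U) (f : Nat)
    (V Q : List String) (hnd : V.Nodup) (hsub : ∀ a ∈ V, a ∈ U) (hf : pvMu U.toFinset.card V Q ≤ f) :
    pvLoopB hist trans f V Q = pvLoopB hist trans (pvMu U.toFinset.card V Q) V Q := by
  have := pvFuelAdd hist trans U hext (f - pvMu U.toFinset.card V Q) (pvMu U.toFinset.card V Q) V Q hnd hsub (le_refl _)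
  rw [this, Nat.add_sub_cancel' hf]

theorem pvMain (hist trans : List (String × List String)) (U : List String)
    (hext : ∀ c x, x ∈ pvExt hist trans c → x ∈ U) (f : Nat) :
    ∀ (E P : List String) (g : Nat), E.Nodup → (∀ a ∈ E, a ∈ U) →
      U.toFinset.card + 1 ≤ f + E.length → pvMu U.toFinset.card E P ≤ g →
      pvLoopA hist trans f E P = pvLoopB hist trans g E P := by
  induction f with
  | zero =>
    intro E P g hnd hsub hf hg
    exfalso
    have := pvLenBound U E hnd hsub
    omega
  | succ f ih =>
    intro E P g hnd hsub hf hg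
    by_cases hP : P = []
    · subst hP
      rw [pvLoopB_nil]
      simp [pvLoopA]
    · have hstep : pvLoopA hist trans (f+1) E P
          = (if PySem.Set.diff (PySem.Set.update PySem.Set.empty (P.flatMap (pvExt hist trans))) E = []
             then E
             else pvLoopA hist trans f
               (PySem.Set.union E (PySem.Set.diff (PySem.Set.update PySem.Set.empty (P.flatMap (pvExt hist trans))) E))
               (PySem.Set.diff (PySem.Set.update PySem.Set.empty (P.flatMap (pvExt hist trans))) E)) := by
        conv_lhs => rw [pvLoopA]
        rw [if_neg hP]
        simp only [pvInnerA]
      rw [hstep]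
      set X := P.flatMap (pvExt hist trans) with hXd
      set nc := PySem.Set.diff (PySem.Set.update PySem.Set.empty X) E with hncd
      have hfil : nc = List.filter (fun y => !PySem.Set.contains E y) (PySem.Set.ofList X) := rfl
      have hEA : PySem.Set.update E X = E ++ nc := by
        rw [PySem.Set.update_eq_append_filter, hfil]
      have hndnc : nc.Nodup := by
        rw [hfil]; exact (PySem.Set.nodup_ofList X).filter _
      have hdisj : ∀ a ∈ nc, a ∉ E := by
        intro a ha
        rw [hfil] at ha
        have := List.of_mem_filter ha
        simpa [PySem.Set.contains_iff] using this
      have hXU : ∀ a ∈ X, a ∈ U := by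
        intro a ha
        obtain ⟨c, hc, hac⟩ := List.mem_flatMap.1 (hXd ▸ ha)
        exact hext c a hac
      have hnd' : (PySem.Set.update E X).Nodup := PySem.Set.nodup_update _ _ hnd
      have hsub' : ∀ a ∈ PySem.Set.update E X, a ∈ U := by
        intro a ha
        rcases (PySem.Set.mem_update _ _ _).1 ha with h | h
        · exact hsub a h
        · exact hXU a h
      have hlenE' : (PySem.Set.update E X).length ≤ U.toFinset.card :=
        pvLenBound U _ hnd' hsub'
      have hlensum : (PySem.Set.update E X).length = E.length + nc.length := by
        rw [hEA, List.length_append]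
      have hdropnc : (PySem.Set.update E X).drop E.length = nc := by
        rw [hEA]; exact List.drop_left
      by_cases hnc : nc = []
      · rw [if_pos hnc]
        rw [pvFuelCanon hist trans U hext g E P hnd hsub hg]
        have hμ : pvMu U.toFinset.card E P = (U.toFinset.card - E.length) + P.length := rfl
        have hb := pvBlock hist trans P (U.toFinset.card - E.length) E []
        rw [List.append_nil] at hb
        rw [hμ, hb, ← hXd, hdropnc, hnc, List.append_nil, pvLoopB_nil, hEA, hnc, List.append_nil]
      · rw [if_neg hnc]
        have hunion : PySem.Set.union E nc = E ++ nc :=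
          PySem.Set.update_eq_append_of_disjoint E nc hndnc hdisj
        rw [hunion, ← hEA]
        rw [pvFuelCanon hist trans U hext g E P hnd hsub hg]
        have hμeq : pvMu U.toFinset.card E P
            = ((U.toFinset.card - (PySem.Set.update E X).length) + nc.length) + P.length := by
          unfold pvMu; omega
        rw [hμeq]
        have hb := pvBlock hist trans P ((U.toFinset.card - (PySem.Set.update E X).length) + nc.length) E []
        rw [List.append_nil] at hb
        rw [hb, ← hXd, hdropnc, List.nil_append]
        apply ih _ _ _ hnd' hsub'
        · have h1 : 0 < nc.length := List.length_pos_iff.2 hnc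
          omega
        · unfold pvMu; omega

-- ===== VERDICT (by name: the statement is the Claim_ definition above) =====
theorem expand_codes_for_concept_spec : Claim_equal_expand_codes_for_concept := by
  intro code hist trans _hdom
  unfold Spec_expand_codes_for_concept expand_codes_for_concept expand_codes_for_concept_alt
  have hbase : PySem.Set.union (PySem.Set.ofList [code]) (pvGet hist code)
      = PySem.Set.ofList (code :: pvGet hist code) := rfl
  rw [hbase]
  set base := PySem.Set.ofList (code :: pvGet hist code) with hbd
  have hnd : base.Nodup := PySem.Set.nodup_ofList _
  have hsub : ∀ a ∈ base, a ∈ pvUniv code hist trans := by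
    intro a ha
    have := (PySem.Set.mem_ofList _ a).1 (hbd ▸ ha)
    rcases List.mem_cons.1 this with rfl | h
    · exact List.mem_cons_self
    · exact List.mem_cons_of_mem _ (List.mem_append.2 (Or.inl (pvGet_subset _ _ _ h)))
  have hbN : base.length ≤ (pvUniv code hist trans).toFinset.card :=
    pvLenBound _ _ hnd hsub
  have hUN : (pvUniv code hist trans).toFinset.card ≤ (pvUniv code hist trans).length :=
    List.toFinset_card_le _
  exact pvMain hist trans (pvUniv code hist trans) (pvExt_subset code hist trans)
    ((pvUniv code hist trans).length + 1) base base ((pvUniv code hist trans).length + 1)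
    hnd hsub (by omega) (by unfold pvMu; omega)
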